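-- pv_equiv track=rewrite | github.com/stepherg/bbfdm | tools/generate_dm_xml.py | organize_parent_child
-- ===== SOURCE A (Python) =====
-- def organize_parent_child(dm_list):
--     organized_dm = []
--
--     for parent_item in dm_list:
--         parent_type = parent_item.get("type")
--         if parent_type != "object":
--             continue
--
--         parent_name = parent_item.get("param")
--
--         organized_dm.append(parent_item)
--
--         for child_item in dm_list:
--             child_type = child_item.get("type")
--             if child_type is None or child_type == "object":
--                 continue
--
--             child_name = child_item.get("param")
--
--             if child_name.find(parent_name) != -1:
--                 parent_dot_count = parent_name.count('.')
--                 child_dot_count = child_name.count('.')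
--                 if parent_dot_count == child_dot_count:
--                     organized_dm.append(child_item)
--
--     return organized_dm
-- ===== SOURCE B (Python) =====
-- def _build_buckets(dm_list):
--     # index: dot-count of 'param' -> children (type present, not "object"), in list order
--     buckets = {}
--     for c in dm_list:
--         t = c.get("type")
--         if t is None or t == "object":
--             continue
--         buckets.setdefault(c["param"].count('.'), []).append(c)
--     return buckets
--
--
-- def organize_parent_child(dm_list):
--     organized = []
--     buckets = None
--     for item in dm_list:
--         if item.get("type") != "object":
--             continue
--         organized.append(item)
--         if buckets is None:
--             buckets = _build_buckets(dm_list)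
--         if not buckets:
--             continue
--         pname = item.get("param")
--         for c in buckets.get(pname.count('.'), []):
--             if pname in c["param"]:
--                 organized.append(c)
--     return organized
-- ===== Notes on version B (the rewrite author's own statement) =====
-- stated objective: alternative
-- what changed: B builds a dot-count index (dict bucket per param depth) once, lazily on the first object parent, so each object parent scans only the bucket of its own depth with a substring test, instead of A's full inner rescan of dm_list per parent.
import Mathlib
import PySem

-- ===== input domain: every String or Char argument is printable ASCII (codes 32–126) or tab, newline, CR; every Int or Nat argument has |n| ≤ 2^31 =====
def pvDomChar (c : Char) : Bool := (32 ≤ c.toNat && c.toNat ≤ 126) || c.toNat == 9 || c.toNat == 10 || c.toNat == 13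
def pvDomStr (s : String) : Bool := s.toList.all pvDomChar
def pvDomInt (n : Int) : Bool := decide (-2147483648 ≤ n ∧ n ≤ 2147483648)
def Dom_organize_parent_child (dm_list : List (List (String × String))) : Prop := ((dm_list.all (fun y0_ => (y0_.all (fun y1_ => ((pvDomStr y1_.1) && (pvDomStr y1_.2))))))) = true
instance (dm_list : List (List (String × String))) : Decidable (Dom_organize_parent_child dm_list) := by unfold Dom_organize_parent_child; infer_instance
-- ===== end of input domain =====

-- B replaces A's full inner scan of dm_list per object parent by a dot-count index
-- (bucket dict) built once, so each parent only scans children of its own depth.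

-- ===== PORT A =====
def organize_parent_child (dm_list : List (List (String × String))) : List (List (String × String)) :=
  dm_list.foldl (fun organized_dm parent_item =>
    let parent_type := PySem.Dict.get? (PySem.Dict.mk parent_item) "type"
    if parent_type ≠ some "object" then organized_dm
    else
      let parent_name := PySem.Dict.get? (PySem.Dict.mk parent_item) "param"
      dm_list.foldl (fun acc child_item =>
        let child_type := PySem.Dict.get? (PySem.Dict.mk child_item) "type"
        if child_type = none ∨ child_type = some "object" then acc
        else
          match PySem.Dict.get? (PySem.Dict.mk child_item) "param", parent_name with
          | some child_name, some pn =>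
            if PySem.Str.find child_name pn ≠ -1 then
              if PySem.Str.count pn "." = PySem.Str.count child_name "." then acc ++ [child_item]
              else acc
            else acc
          | _, _ => acc  -- Python raises here (param is None); excluded by Pre_
      ) (organized_dm ++ [parent_item])
  ) []

-- ===== PORT B =====
-- index: dot-count of 'param' -> children (type present, not "object"), in list order
def pvBuckets (dm_list : List (List (String × String))) :
    PySem.Dict Nat (List (List (String × String))) :=
  dm_list.foldl (fun b c =>
    match PySem.Dict.get? (PySem.Dict.mk c) "type" with
    | none => b
    | some t =>
      if t = "object" then b
      else
        match PySem.Dict.get? (PySem.Dict.mk c) "param" with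
        | none => b  -- Python raises KeyError here; excluded by Pre_
        | some pr => b.modify (PySem.Str.count pr ".") [] (· ++ [c])
  ) PySem.Dict.empty

def organize_parent_child_alt (dm_list : List (List (String × String))) : List (List (String × String)) :=
  (dm_list.foldl (fun (st : List (List (String × String)) × Option (PySem.Dict Nat (List (List (String × String))))) item =>
    if PySem.Dict.get? (PySem.Dict.mk item) "type" ≠ some "object" then st
    else
      let organized := st.1 ++ [item]
      let b := st.2.getD (pvBuckets dm_list)  -- buckets built on first object parent, then cached
      if b.items = [] then (organized, some b)
      else
        match PySem.Dict.get? (PySem.Dict.mk item) "param" with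
        | none => (organized, some b)  -- Python raises here (param is None); excluded by Pre_
        | some pn =>
          ((PySem.Dict.getD b (PySem.Str.count pn ".") []).foldl (fun a c =>
              if PySem.Str.isIn pn ((PySem.Dict.get? (PySem.Dict.mk c) "param").getD "") then a ++ [c]
              else a) organized,
           some b)
  ) ([], none)).1

-- ===== PRECONDITION & SPEC =====
-- Pre_ excludes exactly the inputs on which the Python A raises (TypeError/AttributeError):
-- an item with type "object" and an item with some other type both present, while some such
-- item lacks the "param" key (its .get returns None and .find/.count on None raises).
def Pre_organize_parent_child (dm_list : List (List (String × String))) : Prop :=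
  ((∃ p ∈ dm_list, PySem.Dict.get? (PySem.Dict.mk p) "type" = some "object") ∧
   (∃ c ∈ dm_list, PySem.Dict.get? (PySem.Dict.mk c) "type" ≠ none ∧
      PySem.Dict.get? (PySem.Dict.mk c) "type" ≠ some "object")) →
  (∀ x ∈ dm_list, PySem.Dict.get? (PySem.Dict.mk x) "type" ≠ none →
      (PySem.Dict.get? (PySem.Dict.mk x) "param").isSome)
instance (dm_list : List (List (String × String))) : Decidable (Pre_organize_parent_child dm_list) := by
  unfold Pre_organize_parent_child; infer_instance

def pvWitness_organize_parent_child : (List (List (String × String))) :=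
  [[("type", "object"), ("param", "A.")], [("type", "string"), ("param", "A.x")]]

def Spec_organize_parent_child (dm_list : List (List (String × String))) (out : List (List (String × String))) : Prop := out = organize_parent_child_alt dm_list
instance (dm_list : List (List (String × String))) (out : List (List (String × String))) : Decidable (Spec_organize_parent_child dm_list out) := by unfold Spec_organize_parent_child; infer_instance

-- ===== CLAIM (what is proved, stated in full; the proofs are below) =====
def Claim_equal_organize_parent_child : Prop := ∀ (dm_list : List (List (String × String))), Dom_organize_parent_child dm_list → Pre_organize_parent_child dm_list → Spec_organize_parent_child dm_list (organize_parent_child dm_list)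

-- ===== LEMMAS AND PROOFS =====

-- an item eligible as a child: type present and not "object", and param present
def pvChildOk (c : List (String × String)) : Bool :=
  match PySem.Dict.get? (PySem.Dict.mk c) "type", PySem.Dict.get? (PySem.Dict.mk c) "param" with
  | some t, some _ => t ≠ "object"
  | _, _ => false

def pvParamOf (c : List (String × String)) : String :=
  (PySem.Dict.get? (PySem.Dict.mk c) "param").getD ""

-- A's inner-loop test for parent name pn
def pvA_test (pn : String) (c : List (String × String)) : Bool :=
  pvChildOk c && (PySem.Str.find (pvParamOf c) pn != -1)
    && (PySem.Str.count pn "." == PySem.Str.count (pvParamOf c) ".")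

theorem pvBuckets_getD (L : List (List (String × String))) (k : Nat) :
    (pvBuckets L).getD k []
      = (L.filter pvChildOk).filter (fun c => PySem.Str.count (pvParamOf c) "." == k) := by
  have hstep : pvBuckets L
      = ((L.filter pvChildOk).map (fun c => (PySem.Str.count (pvParamOf c) ".", c))).foldl
          (fun d p => d.modify p.1 [] (· ++ [p.2])) PySem.Dict.empty := by
    rw [List.foldl_map, List.foldl_filter, pvBuckets]
    congr 1
    funext b c
    unfold pvChildOk pvParamOf
    cases h1 : PySem.Dict.get? (PySem.Dict.mk c) "type" with
    | none => simp
    | some t =>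
      cases h2 : PySem.Dict.get? (PySem.Dict.mk c) "param" with
      | none => simp
      | some pr => by_cases ht : t = "object" <;> simp [ht]
  rw [hstep, PySem.Dict.getD_foldl_modify_append]
  simp [List.filter_map, Function.comp_def, List.map_map]

theorem pvA_inner_eq (L : List (List (String × String))) (pn : String) (acc : List (List (String × String))) :
    L.foldl (fun acc child_item =>
        let child_type := PySem.Dict.get? (PySem.Dict.mk child_item) "type"
        if child_type = none ∨ child_type = some "object" then acc
        else
          match PySem.Dict.get? (PySem.Dict.mk child_item) "param", some pn with
          | some child_name, some pn =>
            if PySem.Str.find child_name pn ≠ -1 then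
              if PySem.Str.count pn "." = PySem.Str.count child_name "." then acc ++ [child_item]
              else acc
            else acc
          | _, _ => acc) acc
      = acc ++ L.filter (pvA_test pn) := by
  have h : ∀ (a : List (List (String × String))) (x : List (String × String)),
      (fun acc child_item =>
        let child_type := PySem.Dict.get? (PySem.Dict.mk child_item) "type"
        if child_type = none ∨ child_type = some "object" then acc
        else
          match PySem.Dict.get? (PySem.Dict.mk child_item) "param", some pn with
          | some child_name, some pn =>
            if PySem.Str.find child_name pn ≠ -1 then
              if PySem.Str.count pn "." = PySem.Str.count child_name "." then acc ++ [child_item]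
              else acc
            else acc
          | _, _ => acc) a x
      = (fun acc x => if pvA_test pn x then acc ++ [x] else acc) a x := by
    intro a x
    unfold pvA_test pvChildOk pvParamOf
    cases h1 : PySem.Dict.get? (PySem.Dict.mk x) "type" with
    | none => simp [h1]
    | some t =>
      cases h2 : PySem.Dict.get? (PySem.Dict.mk x) "param" with
      | none => by_cases ht : t = "object" <;> simp [h1, h2, ht]
      | some cn =>
        by_cases ht : t = "object"
        · simp [h1, h2, ht]
        · simp [h1, h2, ht]
          split_ifs <;> tauto
  rw [funext fun a => funext fun x => h a x]
  have := PySem.List.foldl_append_if (pvA_test pn) id L acc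
  simpa using this

-- the two outer-loop bodies, named for the induction
def pvStepA (dm_list : List (List (String × String)))
    (organized_dm : List (List (String × String))) (parent_item : List (String × String)) :
    List (List (String × String)) :=
  let parent_type := PySem.Dict.get? (PySem.Dict.mk parent_item) "type"
  if parent_type ≠ some "object" then organized_dm
  else
    let parent_name := PySem.Dict.get? (PySem.Dict.mk parent_item) "param"
    dm_list.foldl (fun acc child_item =>
      let child_type := PySem.Dict.get? (PySem.Dict.mk child_item) "type"
      if child_type = none ∨ child_type = some "object" then acc
      else
        match PySem.Dict.get? (PySem.Dict.mk child_item) "param", parent_name with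
        | some child_name, some pn =>
          if PySem.Str.find child_name pn ≠ -1 then
            if PySem.Str.count pn "." = PySem.Str.count child_name "." then acc ++ [child_item]
            else acc
          else acc
        | _, _ => acc
    ) (organized_dm ++ [parent_item])

def pvStepB (dm_list : List (List (String × String)))
    (st : List (List (String × String)) × Option (PySem.Dict Nat (List (List (String × String)))))
    (item : List (String × String)) :
    List (List (String × String)) × Option (PySem.Dict Nat (List (List (String × String)))) :=
  if PySem.Dict.get? (PySem.Dict.mk item) "type" ≠ some "object" then st
  else
    let organized := st.1 ++ [item]
    let b := st.2.getD (pvBuckets dm_list)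
    if b.items = [] then (organized, some b)
    else
      match PySem.Dict.get? (PySem.Dict.mk item) "param" with
      | none => (organized, some b)
      | some pn =>
        ((PySem.Dict.getD b (PySem.Str.count pn ".") []).foldl (fun a c =>
            if PySem.Str.isIn pn ((PySem.Dict.get? (PySem.Dict.mk c) "param").getD "") then a ++ [c]
            else a) organized,
         some b)

theorem pvPortA_eq (L : List (List (String × String))) :
    organize_parent_child L = L.foldl (pvStepA L) [] := rfl
theorem pvPortB_eq (L : List (List (String × String))) :
    organize_parent_child_alt L = (L.foldl (pvStepB L) ([], none)).1 := rfl

-- when the parent has no "param", A's inner loop appends nothing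
theorem pvA_inner_none (L : List (List (String × String))) (acc : List (List (String × String))) :
    L.foldl (fun acc child_item =>
        let child_type := PySem.Dict.get? (PySem.Dict.mk child_item) "type"
        if child_type = none ∨ child_type = some "object" then acc
        else
          match PySem.Dict.get? (PySem.Dict.mk child_item) "param",
              (none : Option String) with
          | some child_name, some pn =>
            if PySem.Str.find child_name pn ≠ -1 then
              if PySem.Str.count pn "." = PySem.Str.count child_name "." then acc ++ [child_item]
              else acc
            else acc
          | _, _ => acc) acc = acc := by
  induction L generalizing acc with
  | nil => rfl
  | cons c rest ih =>
    rw [List.foldl_cons]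
    have hc : (let child_type := PySem.Dict.get? (PySem.Dict.mk c) "type"
        if child_type = none ∨ child_type = some "object" then acc
        else
          match PySem.Dict.get? (PySem.Dict.mk c) "param", (none : Option String) with
          | some child_name, some pn =>
            if PySem.Str.find child_name pn ≠ -1 then
              if PySem.Str.count pn "." = PySem.Str.count child_name "." then acc ++ [c]
              else acc
            else acc
          | _, _ => acc) = acc := by
      cases h1 : PySem.Dict.get? (PySem.Dict.mk c) "type" with
      | none => simp [h1]
      | some t =>
        cases h2 : PySem.Dict.get? (PySem.Dict.mk c) "param" with
        | none => by_cases ht : t = "object" <;> simp [h1, h2, ht]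
        | some cn => by_cases ht : t = "object" <;> simp [h1, h2, ht]
    rw [hc]; exact ih acc

-- the three-fold filter on the B side equals A's one-pass filter
theorem pvFilter_eq (L : List (List (String × String))) (pn : String) :
    ((L.filter pvChildOk).filter
        (fun c => PySem.Str.count (pvParamOf c) "." == PySem.Str.count pn ".")).filter
      (fun c => PySem.Str.isIn pn (pvParamOf c))
      = L.filter (pvA_test pn) := by
  rw [List.filter_filter, List.filter_filter]
  apply List.filter_congr
  intro x _
  unfold pvA_test pvChildOk pvParamOf
  cases h1 : PySem.Dict.get? (PySem.Dict.mk x) "type" with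
  | none => simp [h1]
  | some t =>
    cases h2 : PySem.Dict.get? (PySem.Dict.mk x) "param" with
    | none => simp [h1, h2]
    | some cn =>
      by_cases ht : t = "object"
      · simp [h1, h2, ht]
      · by_cases hin : (pn.toList <:+: cn.toList)
        · have hf := (PySem.Chars.find_ne_neg_one_iff cn.toList pn.toList).mpr hin
          have hi := (PySem.Chars.isIn_iff_infix pn.toList cn.toList).mpr hin
          by_cases hc : PySem.Chars.count pn.toList ['.'] = PySem.Chars.count cn.toList ['.']
          · simp [h1, h2, ht, hf, hi, hc]
          · have hc' : ¬ PySem.Chars.count cn.toList ['.'] = PySem.Chars.count pn.toList ['.'] :=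
              fun h => hc h.symm
            have e1 : (PySem.Chars.count cn.toList ['.'] == PySem.Chars.count pn.toList ['.']) = false := by
              simpa using hc'
            have e2 : (PySem.Chars.count pn.toList ['.'] == PySem.Chars.count cn.toList ['.']) = false := by
              simpa using hc
            simp [h1, h2, ht, hf, hi, e1, e2]
        · have hf := (PySem.Chars.find_eq_neg_one_iff cn.toList pn.toList).mpr hin
          have hi := (PySem.Chars.isIn_eq_false_iff pn.toList cn.toList).mpr hin
          simp [h1, h2, ht, hf, hi]

-- an empty bucket index means no item passes A's inner test
theorem pvEmpty_no_child (L : List (List (String × String))) (pn : String)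
    (hb : (pvBuckets L).items = []) : L.filter (pvA_test pn) = [] := by
  have hbe : pvBuckets L = PySem.Dict.empty := PySem.Dict.ext hb
  rw [← pvFilter_eq L pn]
  have := pvBuckets_getD L (PySem.Str.count pn ".")
  rw [hbe] at this
  simp only [PySem.Dict.getD_empty] at this
  rw [← this]
  simp

-- one outer step: B's list component tracks A's, B's cached index stays valid
theorem pvStep_eq (L : List (List (String × String))) (c : List (String × String))
    (acc : List (List (String × String)))
    (bo : Option (PySem.Dict Nat (List (List (String × String)))))
    (hbo : bo = none ∨ bo = some (pvBuckets L)) :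
    (pvStepB L (acc, bo) c).1 = pvStepA L acc c ∧
      ((pvStepB L (acc, bo) c).2 = none ∨ (pvStepB L (acc, bo) c).2 = some (pvBuckets L)) := by
  have hbg : bo.getD (pvBuckets L) = pvBuckets L := by
    rcases hbo with rfl | rfl <;> rfl
  unfold pvStepA pvStepB
  by_cases htype : PySem.Dict.get? (PySem.Dict.mk c) "type" = some "object"
  case neg => simp [htype, hbo]
  case pos =>
    simp only [htype, ne_eq, not_true_eq_false, if_false, reduceIte, hbg]
    by_cases hb : (pvBuckets L).items = []
    · simp only [hb, if_true, reduceIte]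
      refine ⟨?_, by simp⟩
      cases hp : PySem.Dict.get? (PySem.Dict.mk c) "param" with
      | none => exact (pvA_inner_none L (acc ++ [c])).symm
      | some pn =>
        rw [pvA_inner_eq L pn (acc ++ [c]), pvEmpty_no_child L pn hb]
        simp
    · simp only [hb, if_false, reduceIte]
      cases hp : PySem.Dict.get? (PySem.Dict.mk c) "param" with
      | none =>
        refine ⟨?_, by simp⟩
        exact (pvA_inner_none L (acc ++ [c])).symm
      | some pn =>
        refine ⟨?_, by simp⟩
        rw [pvA_inner_eq L pn (acc ++ [c])]
        have hfold := PySem.List.foldl_append_if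
          (fun c => PySem.Str.isIn pn ((PySem.Dict.get? (PySem.Dict.mk c) "param").getD "")) id
          ((pvBuckets L).getD (PySem.Str.count pn ".") []) (acc ++ [c])
        simp only [id_eq, List.map_id] at hfold
        show List.foldl
            (fun a c => if PySem.Str.isIn pn ((PySem.Dict.get? (PySem.Dict.mk c) "param").getD "") = true then a ++ [c] else a)
            (acc ++ [c]) ((pvBuckets L).getD (PySem.Str.count pn ".") [])
          = acc ++ [c] ++ List.filter (pvA_test pn) L
        rw [hfold]
        have hgd := pvBuckets_getD L (PySem.Str.count pn ".")
        have hfe := pvFilter_eq L pn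
        simp only [pvParamOf] at hgd hfe
        rw [hgd, hfe]

theorem pvFold_eq (L rest : List (List (String × String)))
    (acc : List (List (String × String)))
    (bo : Option (PySem.Dict Nat (List (List (String × String)))))
    (hbo : bo = none ∨ bo = some (pvBuckets L)) :
    (rest.foldl (pvStepB L) (acc, bo)).1 = rest.foldl (pvStepA L) acc := by
  induction rest generalizing acc bo with
  | nil => rfl
  | cons c rest ih =>
    rw [List.foldl_cons, List.foldl_cons]
    obtain ⟨h1, h2⟩ := pvStep_eq L c acc bo hbo
    have : pvStepB L (acc, bo) c = ((pvStepB L (acc, bo) c).1, (pvStepB L (acc, bo) c).2) := rfl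
    rw [this, h1]
    exact ih (pvStepA L acc c) _ h2

theorem organize_parent_child_spec' (L : List (List (String × String))) :
    organize_parent_child L = organize_parent_child_alt L := by
  rw [pvPortA_eq, pvPortB_eq]
  exact (pvFold_eq L L [] none (Or.inl rfl)).symm

-- ===== VERDICT (by name: the statement is the Claim_ definition above) =====
theorem organize_parent_child_spec : Claim_equal_organize_parent_child := by
  intro L _ _
  exact organize_parent_child_spec' L
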